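-- pv_equiv track=rewrite | github.com/USYD2020/A2 | CUAD_data_spark_processing.py | calculate_avg_ps_num
-- ===== SOURCE A (Python) =====
-- def calculate_avg_ps_num(title, q_ps_list):
--     total_ps_num = 0
--     titles = set()
--     for element in q_ps_list:
--         titles.add(element[0])
--         if element[0] != title:
--             total_ps_num += element[1]
--     return int(total_ps_num / len(titles))
-- ===== SOURCE B (Python) =====
-- def calculate_avg_ps_num(title, q_ps_list):
--     groups = {}
--     for name, num in q_ps_list:
--         groups[name] = groups.get(name, 0) + num
--     total = sum(v for k, v in groups.items() if k != title)
--     return int(total / len(groups))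
-- ===== Notes on version B (the rewrite author's own statement) =====
-- stated objective: alternative
-- what changed: Replaces the single per-element conditional-sum-plus-set pass by a group-by phase (a dict mapping each title to its total paragraph count) followed by a separate aggregation over the distinct titles, dividing by the dict's size.
import Mathlib
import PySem

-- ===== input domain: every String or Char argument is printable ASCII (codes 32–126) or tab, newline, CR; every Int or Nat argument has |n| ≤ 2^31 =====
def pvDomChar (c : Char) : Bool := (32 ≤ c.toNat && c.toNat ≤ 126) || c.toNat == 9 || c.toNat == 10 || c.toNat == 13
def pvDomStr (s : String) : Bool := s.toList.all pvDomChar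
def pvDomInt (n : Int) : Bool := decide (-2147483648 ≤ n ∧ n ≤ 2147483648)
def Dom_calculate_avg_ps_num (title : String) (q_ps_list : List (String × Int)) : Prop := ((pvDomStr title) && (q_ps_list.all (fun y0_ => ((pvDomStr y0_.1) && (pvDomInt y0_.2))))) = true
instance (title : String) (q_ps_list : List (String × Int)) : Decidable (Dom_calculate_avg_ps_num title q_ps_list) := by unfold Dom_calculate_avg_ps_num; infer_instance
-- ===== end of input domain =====

-- B replaces A's single conditional-sum pass by a group-by dict then a separate aggregation
-- over the distinct titles (alternative decomposition, same cost). Equivalence of the RETURN value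
-- is proved on nonempty lists; on [] both Pythons raise ZeroDivisionError.
-- int(total / len) is ported as PySem.Int.truncdiv (exact while |total| < 2^53).

-- ===== PORT A =====
def calculate_avg_ps_num (title : String) (q_ps_list : List (String × Int)) : Int :=
  -- 'for element in q_ps_list: titles.add(element[0]); if element[0] != title: total += element[1]'
  let st := q_ps_list.foldl
    (fun (st : Int × PySem.Set String) element =>
      (if element.1 != title then st.1 + element.2 else st.1, PySem.Set.add st.2 element.1))
    (0, PySem.Set.empty)
  PySem.Int.truncdiv st.1 st.2.length   -- int(total_ps_num / len(titles))

-- ===== PORT B =====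
def calculate_avg_ps_num_alt (title : String) (q_ps_list : List (String × Int)) : Int :=
  -- 'groups[name] = groups.get(name, 0) + num'
  let groups := q_ps_list.foldl
    (fun (d : PySem.Dict String Int) e => d.insert e.1 (d.getD e.1 0 + e.2))
    PySem.Dict.empty
  -- 'total = sum(v for k, v in groups.items() if k != title)'
  let total := ((groups.items.filter (fun p => p.1 != title)).map (·.2)).sum
  PySem.Int.truncdiv total groups.size   -- int(total / len(groups))

-- ===== PRECONDITION & SPEC =====
-- Pre_ excludes only the empty list, on which both A and B raise ZeroDivisionError.
def Pre_calculate_avg_ps_num (title : String) (q_ps_list : List (String × Int)) : Prop :=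
  q_ps_list ≠ []
instance (title : String) (q_ps_list : List (String × Int)) : Decidable (Pre_calculate_avg_ps_num title q_ps_list) := by unfold Pre_calculate_avg_ps_num; infer_instance
def pvWitness_calculate_avg_ps_num : String × (List (String × Int)) := ("a", [("b", 3), ("a", 5)])
def Spec_calculate_avg_ps_num (title : String) (q_ps_list : List (String × Int)) (out : Int) : Prop := out = calculate_avg_ps_num_alt title q_ps_list
instance (title : String) (q_ps_list : List (String × Int)) (out : Int) : Decidable (Spec_calculate_avg_ps_num title q_ps_list out) := by unfold Spec_calculate_avg_ps_num; infer_instance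

-- ===== CLAIM (what is proved, stated in full; the proofs are below) =====
def Claim_equal_calculate_avg_ps_num : Prop := ∀ (title : String) (q_ps_list : List (String × Int)), Dom_calculate_avg_ps_num title q_ps_list → Pre_calculate_avg_ps_num title q_ps_list → Spec_calculate_avg_ps_num title q_ps_list (calculate_avg_ps_num title q_ps_list)

-- ===== LEMMAS AND PROOFS =====

-- the filtered value-sum B computes from the dict's items (also applicable to the raw input list)
def pvFSum (title : String) (ps : List (String × Int)) : Int :=
  ((ps.filter (fun p => p.1 != title)).map (·.2)).sum

-- replacing the (unique) entry at key k by (k, w) changes the filtered sum by w - old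
lemma pvFSum_map_replace (title k : String) (old w : Int) (ps : List (String × Int))
    (hnd : (ps.map (·.1)).Nodup) (hmem : (k, old) ∈ ps) :
    pvFSum title (ps.map (fun p => if p.1 == k then (k, w) else p)) =
      pvFSum title ps + (if k != title then w - old else 0) := by
  induction ps with
  | nil => cases hmem
  | cons p rest ih =>
    simp only [List.map_cons, List.nodup_cons, List.mem_map] at hnd
    by_cases hk : p.1 = k
    · have hrest : rest.map (fun p => if p.1 == k then (k, w) else p) = rest := by
        rw [List.map_congr_left (g := id) (fun q hq => by
              have : q.1 ≠ k := fun h => hnd.1 ⟨q, hq, hk ▸ h⟩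
              simp [this]), List.map_id]
      have hold : (k, old) = p := by
        rcases List.mem_cons.mp hmem with h | h
        · exact h
        · exact absurd ⟨(k, old), h, hk ▸ rfl⟩ hnd.1
      simp only [List.map_cons, hk, BEq.rfl, if_true, hrest]
      have : p = (k, old) := hold.symm
      subst this
      simp only [pvFSum, List.filter_cons]
      by_cases ht : (k != title) = true
      · simp only [ht, if_true, List.map_cons, List.sum_cons]
        ring
      · simp only [ht, Bool.false_eq_true, if_false]
        ring
    · have hmem' : (k, old) ∈ rest := by
        rcases List.mem_cons.mp hmem with h | h
        · exact absurd (congrArg Prod.fst h.symm) hk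
        · exact h
      have hne : (p.1 == k) = false := by simp [hk]
      simp only [List.map_cons, hne, Bool.false_eq_true, if_false]
      have ihr := ih hnd.2 hmem'
      simp only [pvFSum, List.filter_cons] at ihr ⊢
      by_cases ht : p.1 != title
      · simp only [ht, if_true, List.map_cons, List.sum_cons]
        omega
      · simp only [ht, Bool.false_eq_true, if_false]
        omega

-- one group-by step adds (if the key is not the excluded title) the new value to the filtered sum
lemma pvFSum_insert (title k : String) (v : Int) (d : PySem.Dict String Int)
    (hnd : d.keys.Nodup) :
    pvFSum title ((d.insert k (d.getD k 0 + v)).items) =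
      pvFSum title d.items + (if k != title then v else 0) := by
  by_cases hc : d.contains k = true
  · obtain ⟨old, hget⟩ : ∃ old, d.get? k = some old := by
      rcases h : d.get? k with _ | old
      · rw [PySem.Dict.get?_eq_none_iff_contains] at h
        simp [h] at hc
      · exact ⟨old, rfl⟩
    have hgd : d.getD k 0 = old := PySem.Dict.getD_of_get?_eq_some d 0 hget
    have hmem : (k, old) ∈ d.items := PySem.Dict.mem_items_of_get?_eq_some d hget
    rw [PySem.Dict.items_insert_of_contains d _ hc, hgd,
        pvFSum_map_replace title k old (old + v) d.items hnd hmem]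
    split <;> ring
  · have hgd : d.getD k 0 = 0 := PySem.Dict.getD_of_not_contains d 0 (by simpa using hc)
    rw [PySem.Dict.items_insert_of_not_contains d _ (by simpa using hc), hgd]
    simp only [pvFSum, List.filter_append, List.map_append, List.sum_append,
      List.filter_cons, List.filter_nil]
    split <;> simp

-- loop invariant: the filtered value-sum of the growing dict tracks the filtered sum of the input
lemma pvFSum_fold (title : String) (l : List (String × Int)) :
    ∀ (d : PySem.Dict String Int), d.keys.Nodup →
      pvFSum title ((l.foldl (fun d e => d.insert e.1 (d.getD e.1 0 + e.2)) d).items) =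
        pvFSum title d.items + pvFSum title l := by
  induction l with
  | nil => intro d _; simp [pvFSum]
  | cons e t ih =>
    intro d hnd
    simp only [List.foldl_cons]
    rw [ih _ (PySem.Dict.nodup_keys_insert d e.1 _ hnd), pvFSum_insert title e.1 e.2 d hnd]
    simp only [pvFSum, List.filter_cons]
    by_cases ht : e.1 != title
    · simp only [ht, if_true, List.map_cons, List.sum_cons]; ring
    · simp only [ht, Bool.false_eq_true, if_false]; ring

-- the dict's key list is exactly A's set of titles
lemma pvKeys_fold (l : List (String × Int)) :
    (l.foldl (fun d e => d.insert e.1 (d.getD e.1 0 + e.2)) PySem.Dict.empty).keys =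
      l.foldl (fun s e => PySem.Set.add s e.1) PySem.Set.empty := by
  rw [PySem.Dict.keys_foldl_insert_key l (fun e => e.1)
        (fun d e => d.getD e.1 0 + e.2) PySem.Dict.empty]
  simp only [PySem.Dict.keys_empty, PySem.Set.update, ← List.foldl_map]
  rfl

-- A's accumulated total is the filtered sum of the input list
lemma pvTotal_A (title : String) (l : List (String × Int)) :
    l.foldl (fun t e => if e.1 != title then t + e.2 else t) 0 = pvFSum title l := by
  rw [PySem.List.foldl_if_eq_foldl_filter (fun (e : String × Int) => e.1 != title) (fun (t : Int) (e : String × Int) => t + e.2),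
      PySem.List.foldl_add (l.filter (fun e => e.1 != title)) (fun (e : String × Int) => e.2) 0]
  simp [pvFSum]

-- ===== VERDICT (by name: the statement is the Claim_ definition above) =====
theorem calculate_avg_ps_num_spec : Claim_equal_calculate_avg_ps_num := by
  intro title l _ _
  simp only [Spec_calculate_avg_ps_num, calculate_avg_ps_num, calculate_avg_ps_num_alt]
  rw [PySem.List.foldl_prod_mk
        (fun t e => if e.1 != title then t + e.2 else t)
        (fun s e => PySem.Set.add s e.1) l 0 PySem.Set.empty]
  have hsum := pvFSum_fold title l PySem.Dict.empty (by simp)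
  have hkeys := pvKeys_fold l
  have hsz : (l.foldl (fun d e => d.insert e.1 (d.getD e.1 0 + e.2)) PySem.Dict.empty).size =
      (l.foldl (fun s e => PySem.Set.add s e.1) PySem.Set.empty).length := by
    rw [← hkeys]; simp [PySem.Dict.size, PySem.Dict.keys]
  simp only [pvTotal_A title l, hsz]
  congr 1
  simp only [pvFSum] at hsum ⊢
  rw [hsum]
  simp [PySem.Dict.empty]
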